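-- pv_equiv track=rewrite | github.com/rodrigolopesribeiro/zap-backend | find_zap_by_address.py | parse_page_from_text
-- ===== SOURCE A (Python) =====
-- from typing import Any, Callable, Optional, Set
--
-- def parse_page_from_text(value: str) -> Optional[int]:
--     text = (value or "").strip()
--     if not text:
--         return None
--     digits = "".join(ch for ch in text if ch.isdigit())
--     if not digits:
--         return None
--     parsed = int(digits)
--     return parsed if parsed > 0 else None
-- ===== SOURCE B (Python) =====
-- def parse_page_from_text(value):
--     # Single pass: fold digits into a running integer instead of building a
--     # digit string and calling int() once.
--     parsed = 0
--     found = False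
--     for ch in (value or "").strip():
--         if ch.isdigit():
--             found = True
--             parsed = parsed * 10 + int(ch)
--     if not found:
--         return None
--     return parsed if parsed > 0 else None
-- ===== Notes on version B (the rewrite author's own statement) =====
-- stated objective: alternative
-- what changed: B replaces A's three-phase pipeline (collect digit characters into an intermediate string, then one int() parse, then the positivity check) by a single scan that folds each digit into a running integer accumulator with a found flag.
import Mathlib
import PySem

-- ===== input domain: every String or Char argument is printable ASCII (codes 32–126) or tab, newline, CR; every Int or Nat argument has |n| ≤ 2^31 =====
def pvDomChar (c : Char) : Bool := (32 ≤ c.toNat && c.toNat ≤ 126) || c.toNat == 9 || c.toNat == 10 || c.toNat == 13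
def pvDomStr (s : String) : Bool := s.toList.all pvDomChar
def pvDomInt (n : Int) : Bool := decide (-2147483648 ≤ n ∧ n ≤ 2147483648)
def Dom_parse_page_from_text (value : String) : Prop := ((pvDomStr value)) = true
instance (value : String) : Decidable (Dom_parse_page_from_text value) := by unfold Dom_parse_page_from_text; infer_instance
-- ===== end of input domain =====

-- B replaces A's collect-digits-then-int() pipeline by a single scan folding digits into a
-- running accumulator; proved equal on every Dom input (both are total there).

-- ===== PORT A =====
-- int(s) ported by hand for THIS call site: here s is always a nonempty string of '0'..'9'
-- (the filter below keeps exactly those on ASCII input), on which int() is exactly the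
-- decimal fold.  (PySem.Int.ofStr? computes the same values but its private helper cannot
-- be reasoned about.)
def pvIntOfDigits (cs : List Char) : Int :=
  cs.foldl (fun a c => a * 10 + ((c.toNat : Int) - 48)) 0

def parse_page_from_text (value : String) : Option Int :=
  let text := (PySem.Str.strip value).toList       -- (value or "").strip(); '' is falsy so 'or' is the identity on str input
  if text = [] then none                           -- if not text: return None
  else
    let digits := text.filter PySem.Chars.isdigit  -- "".join(ch for ch in text if ch.isdigit())
    if digits = [] then none                       -- if not digits: return None
    else
      let parsed := pvIntOfDigits digits           -- parsed = int(digits)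
      if parsed > 0 then some parsed else none     -- return parsed if parsed > 0 else None

-- ===== PORT B =====
def parse_page_from_text_alt (value : String) : Option Int :=
  -- state (found, parsed); int(ch) on a '0'..'9' char is ch.toNat - 48 (hand port, exact here)
  let st := (PySem.Str.strip value).toList.foldl
    (fun (s : Bool × Int) ch =>
      if PySem.Chars.isdigit ch then (true, s.2 * 10 + ((ch.toNat : Int) - 48)) else s)
    (false, 0)
  if st.1 = false then none
  else if st.2 > 0 then some st.2 else none

-- ===== PRECONDITION & SPEC =====
def Spec_parse_page_from_text (value : String) (out : Option Int) : Prop := out = parse_page_from_text_alt value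
instance (value : String) (out : Option Int) : Decidable (Spec_parse_page_from_text value out) := by unfold Spec_parse_page_from_text; infer_instance

-- ===== CLAIM (what is proved, stated in full; the proofs are below) =====
def Claim_equal_parse_page_from_text : Prop := ∀ (value : String), Dom_parse_page_from_text value → Spec_parse_page_from_text value (parse_page_from_text value)

-- ===== LEMMAS AND PROOFS =====
theorem pv_fold_digits (l : List Char) (b : Bool) (acc : Int) :
    l.foldl
      (fun (s : Bool × Int) ch =>
        if PySem.Chars.isdigit ch then (true, s.2 * 10 + ((ch.toNat : Int) - 48)) else s)
      (b, acc)
    = (b || !(l.filter PySem.Chars.isdigit).isEmpty,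
       (l.filter PySem.Chars.isdigit).foldl (fun a c => a * 10 + ((c.toNat : Int) - 48)) acc) := by
  induction l generalizing b acc with
  | nil => simp
  | cons c t ih => by_cases h : PySem.Chars.isdigit c <;> simp [h, ih]

-- ===== VERDICT (by name: the statement is the Claim_ definition above) =====
theorem parse_page_from_text_spec : Claim_equal_parse_page_from_text := by
  intro value _
  unfold Spec_parse_page_from_text parse_page_from_text parse_page_from_text_alt pvIntOfDigits
  rw [pv_fold_digits]
  simp only [PySem.Str.toList_strip]
  by_cases hl : PySem.Chars.strip value.toList = []
  · simp [hl]
  · by_cases hd : (PySem.Chars.strip value.toList).filter PySem.Chars.isdigit = []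
    · simp [hl, hd]
    · simp [hl, hd]
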